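-- pv_equiv track=rewrite | github.com/ulsmallzhou/Dice | dice-v1.0.py | iflegal_dfunction
-- ===== SOURCE A (Python) =====
-- num_char = ['0', '1', '2', '3', '4', '5', '6', '7', '8', '9', 'd']
--
-- def iflegal_dfunction(ipt: str):
--     '''纯数字+d表达式合法性审查'''
--     if not isinstance(ipt, str): return False   # 确保是字符串
--     if len(ipt) == 0: return False              # 确保非空
--     for char in ipt:
--         if char not in num_char: return False   # 确保均为数字或d
--     if 'd' not in ipt: return True              # 纯数字合法
--     first_d, d_num = ipt.find('d'), ipt.count('d')
--     for cid in range(d_num):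
--         if ipt[cid + first_d] != 'd': return False
--     return True
-- ===== SOURCE B (Python) =====
-- def iflegal_dfunction(ipt: str):
--     '''纯数字+d表达式合法性审查 (single left-to-right scan: digits, then d-run, then digits)'''
--     if not isinstance(ipt, str):
--         return False
--     i, n = 0, len(ipt)
--     while i < n and ipt[i].isdigit():
--         i += 1
--     while i < n and ipt[i] == 'd':
--         i += 1
--     while i < n and ipt[i].isdigit():
--         i += 1
--     return i == n and n > 0
-- ===== Notes on version B (the rewrite author's own statement) =====
-- stated objective: simpler
-- what changed: A scans the charset, then uses find/count plus an index loop to check the d's are contiguous; B is a single left-to-right pointer scan consuming a digit prefix, one run of d's, and a digit suffix, accepting iff the whole nonempty string is consumed.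
import Mathlib
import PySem

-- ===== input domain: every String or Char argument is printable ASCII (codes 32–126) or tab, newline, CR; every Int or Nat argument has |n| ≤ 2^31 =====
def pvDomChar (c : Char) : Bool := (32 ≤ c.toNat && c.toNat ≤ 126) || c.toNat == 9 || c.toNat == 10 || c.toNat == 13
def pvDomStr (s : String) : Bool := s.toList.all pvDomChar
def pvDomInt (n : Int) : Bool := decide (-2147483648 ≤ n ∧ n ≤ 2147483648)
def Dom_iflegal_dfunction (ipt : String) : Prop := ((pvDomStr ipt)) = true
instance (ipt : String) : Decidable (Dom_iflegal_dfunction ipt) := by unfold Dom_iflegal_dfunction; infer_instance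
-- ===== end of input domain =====

-- B replaces A's charset scan plus find/count/index loop by one left-to-right scan (digit prefix, then the d-run, then digit suffix); objective: simpler, same O(n) cost.

-- ===== PORT A =====
def pvNumChar : List Char := ['0', '1', '2', '3', '4', '5', '6', '7', '8', '9', 'd']

def iflegal_dfunction (ipt : String) : Bool :=
  let cs := ipt.toList
  if cs.length == 0 then false                   -- if len(ipt) == 0: return False
  else if !(cs.all fun c => pvNumChar.contains c) then false  -- for char in ipt: if char not in num_char: return False
  else if !(PySem.Chars.isIn ['d'] cs) then true -- if 'd' not in ipt: return True
  else
    let first_d := PySem.Chars.find cs ['d']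
    let d_num := PySem.Chars.count cs ['d']
    -- for cid in range(d_num): if ipt[cid + first_d] != 'd': return False
    -- (in this branch cid + first_d is always in range, so pyGet? is always some here; exact)
    (List.range d_num).all fun cid => PySem.List.pyGet? cs ((cid : Int) + first_d) == some 'd'

-- ===== PORT B =====
def iflegal_dfunction_alt (ipt : String) : Bool :=
  let cs := ipt.toList
  let r1 := cs.dropWhile PySem.Chars.isdigit     -- while i < n and ipt[i].isdigit(): i += 1
  let r2 := r1.dropWhile (fun c => c == 'd')     -- while i < n and ipt[i] == 'd': i += 1
  let r3 := r2.dropWhile PySem.Chars.isdigit     -- while i < n and ipt[i].isdigit(): i += 1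
  r3.isEmpty && !cs.isEmpty                      -- return i == n and n > 0

-- ===== PRECONDITION & SPEC =====
def Spec_iflegal_dfunction (ipt : String) (out : Bool) : Prop := out = iflegal_dfunction_alt ipt
instance (ipt : String) (out : Bool) : Decidable (Spec_iflegal_dfunction ipt out) := by unfold Spec_iflegal_dfunction; infer_instance

-- ===== CLAIM (what is proved, stated in full; the proofs are below) =====
def Claim_equal_iflegal_dfunction : Prop := ∀ (ipt : String), Dom_iflegal_dfunction ipt → Spec_iflegal_dfunction ipt (iflegal_dfunction ipt)

-- ===== LEMMAS AND PROOFS =====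

-- the canonical shape both programs accept: digits, then a run of 'd', then digits, nonempty
def pvShape (cs : List Char) : Prop :=
  cs ≠ [] ∧ ∃ as bs es : List Char, cs = as ++ bs ++ es ∧
    (∀ c ∈ as, PySem.Chars.isdigit c = true) ∧ (∀ c ∈ bs, c = 'd') ∧
    (∀ c ∈ es, PySem.Chars.isdigit c = true)

-- membership in num_char is 'digit or d'
theorem pvCharset (c : Char) : pvNumChar.contains c = (PySem.Chars.isdigit c || c == 'd') := by
  rw [Bool.eq_iff_iff]
  simp [pvNumChar, PySem.Chars.isdigit, Char.le_def, UInt32.le_iff_toNat_le, Char.ext_iff,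
    UInt32.ext_iff, BEq.beq]
  omega

-- Python's s.count(sub) for a one-character sub is the character count
theorem pvCountGo (x : Char) (l : List Char) : ∀ (fuel acc : Nat), l.length ≤ fuel →
    PySem.Chars.count.go [x] fuel l acc = acc + l.count x := by
  induction l with
  | nil => intro fuel acc h; cases fuel <;> simp [PySem.Chars.count.go]
  | cons h t ih =>
    intro fuel acc hf
    cases fuel with
    | zero => simp at hf
    | succ n =>
      have hlen : t.length ≤ n := by simpa using hf
      rw [PySem.Chars.count.go]
      by_cases hx : x = h
      · subst hx
        simp [List.isPrefixOf, ih n (acc + 1) hlen]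
        omega
      · simp [List.isPrefixOf, beq_iff_eq, hx, ih n acc hlen, List.count_cons]
        exact fun h2 => hx h2.symm

theorem pvCountSingleton (x : Char) (l : List Char) :
    PySem.Chars.count l [x] = l.count x := by
  simp [PySem.Chars.count, pvCountGo x l l.length 0 le_rfl]

theorem pvPrefixDrop (x : Char) (l : List Char) (j : Nat) :
    ([x] <+: l.drop j) ↔ l[j]? = some x := by
  rw [← List.head?_drop]
  cases l.drop j <;> simp [List.prefix_cons_iff, eq_comm]

theorem pvDropAll {p : Char → Bool} {as l : List Char} (h : ∀ c ∈ as, p c = true) :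
    List.dropWhile p (as ++ l) = List.dropWhile p l := by
  rw [List.dropWhile_append, List.dropWhile_eq_nil_iff.2 h]
  simp

theorem pvB_iff (cs : List Char) :
    ((((cs.dropWhile PySem.Chars.isdigit).dropWhile (fun c => c == 'd')).dropWhile
        PySem.Chars.isdigit).isEmpty && !cs.isEmpty) = true ↔ pvShape cs := by
  constructor
  · intro h
    simp only [Bool.and_eq_true, List.isEmpty_iff, Bool.not_eq_true', List.isEmpty_eq_false_iff] at h
    refine ⟨h.2, cs.takeWhile PySem.Chars.isdigit,
      (cs.dropWhile PySem.Chars.isdigit).takeWhile (fun c => c == 'd'),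
      (cs.dropWhile PySem.Chars.isdigit).dropWhile (fun c => c == 'd'), ?_, ?_, ?_, ?_⟩
    · rw [List.append_assoc, List.takeWhile_append_dropWhile, List.takeWhile_append_dropWhile]
    · exact fun c hc => List.mem_takeWhile_imp hc
    · exact fun c hc => by simpa using List.mem_takeWhile_imp hc
    · exact List.dropWhile_eq_nil_iff.1 h.1
  · rintro ⟨hne, as, bs, es, rfl, has, hbs, hes⟩
    simp only [Bool.and_eq_true, List.isEmpty_iff, Bool.not_eq_true', List.isEmpty_eq_false_iff]
    refine ⟨?_, hne⟩
    rw [List.append_assoc, pvDropAll has]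
    cases bs with
    | nil =>
      simp only [List.nil_append]
      rw [List.dropWhile_eq_nil_iff.2 hes]
      simp
    | cons b bs' =>
      have hb : b = 'd' := hbs b (by simp)
      subst hb
      rw [List.cons_append, List.dropWhile_cons_of_neg (by decide)]
      rw [List.dropWhile_cons_of_pos (by decide),
        pvDropAll (fun c hc => by simp [hbs c (by simp [hc])])]
      cases es with
      | nil => simp
      | cons e es' =>
        have he : PySem.Chars.isdigit e = true := hes e (by simp)
        have h3 : (e == 'd') = false := by
          refine Bool.eq_false_iff.2 fun h2 => ?_
          rw [show e = 'd' by simpa using h2] at he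
          exact absurd he (by decide)
        rw [show List.dropWhile (fun c => c == 'd') (e :: es') = e :: es' from by simp [h3]]
        exact List.dropWhile_eq_nil_iff.2 hes

theorem pvA_core (cs : List Char) (h0 : cs ≠ [])
    (hall : ∀ c ∈ cs, (PySem.Chars.isdigit c || c == 'd') = true) (hd : 'd' ∈ cs) :
    ((List.range (PySem.Chars.count cs ['d'])).all fun cid =>
       PySem.List.pyGet? cs ((cid : Int) + PySem.Chars.find cs ['d']) == some 'd') = true
     ↔ pvShape cs := by
  have hinf : ['d'] <:+: cs := (List.singleton_infix_iff _ _).2 hd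
  have hne : PySem.Chars.find cs ['d'] ≠ -1 := (PySem.Chars.find_ne_neg_one_iff _ _).2 hinf
  have hnn : (0 : Int) ≤ PySem.Chars.find cs ['d'] := (PySem.Chars.find_nonneg_iff _ _).2 hinf
  have hspec := PySem.Chars.findFrom_natCast_spec cs ['d'] 0 (Nat.zero_le _)
  rw [Nat.cast_zero, PySem.Chars.findFrom_zero] at hspec
  obtain ⟨-, hpre, hmin⟩ := hspec hne
  set f := PySem.Chars.find cs ['d'] with hf
  set a := f.toNat with ha
  have hfa : f = (a : Int) := (Int.toNat_of_nonneg hnn).symm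
  have hget : cs[a]? = some 'd' := (pvPrefixDrop _ _ _).1 hpre
  have hmin' : ∀ i, i < a → cs[i]? ≠ some 'd' := fun i h1 h2 =>
    hmin i (Nat.zero_le _) h1 ((pvPrefixDrop _ _ _).2 h2)
  rw [pvCountSingleton]
  set k := cs.count 'd' with hk
  have hdg : PySem.Chars.isdigit 'd' = false := by decide
  rw [List.all_eq_true]
  have hstep : ∀ cid : Nat, ((PySem.List.pyGet? cs ((cid : Int) + f) == some 'd') = true)
      ↔ cs[a + cid]? = some 'd' := by
    intro cid
    rw [hfa, show ((cid : Int) + (a : Int)) = ((a + cid : Nat) : Int) by push_cast; ring,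
      PySem.List.pyGet?_natCast]
    simp
  constructor
  · intro hl
    replace hl : ∀ cid, cid < k → cs[a + cid]? = some 'd' := fun cid hcid =>
      (hstep cid).1 (hl cid (List.mem_range.2 hcid))
    have hk1 : 1 ≤ k := List.count_pos_iff.2 hd
    have hak : a + k ≤ cs.length := by
      obtain ⟨hlt, -⟩ := List.getElem?_eq_some_iff.1 (hl (k - 1) (by omega))
      omega
    have halen : a < cs.length := (List.getElem?_eq_some_iff.1 hget).1
    have hsplit : cs = cs.take a ++ (cs.drop a).take k ++ cs.drop (a + k) := by
      rw [List.append_assoc]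
      conv_lhs => rw [← List.take_append_drop a cs]
      congr 1
      conv_lhs => rw [← List.take_append_drop k (cs.drop a)]
      congr 1
      rw [List.drop_drop, Nat.add_comm]
    have hbslen : ((cs.drop a).take k).length = k := by
      simp [List.length_take, List.length_drop]; omega
    have has : ∀ c ∈ cs.take a, PySem.Chars.isdigit c = true := by
      intro c hc
      obtain ⟨i, hi, hci⟩ := List.mem_iff_getElem.1 hc
      have hia : i < a := by
        have h2 := hi
        simp only [List.length_take] at h2
        omega
      have hcs : cs[i]? = some c := by
        rw [← List.getElem?_take_of_lt hia, List.getElem?_eq_getElem hi, hci]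
      have hcd : c ≠ 'd' := fun h => hmin' i hia (h ▸ hcs)
      have hmem : c ∈ cs := (List.getElem?_eq_some_iff.1 hcs).2 ▸
        List.getElem_mem (List.getElem?_eq_some_iff.1 hcs).1
      have := hall c hmem
      simp only [Bool.or_eq_true, beq_iff_eq] at this
      tauto
    have hbs : ∀ c ∈ (cs.drop a).take k, c = 'd' := by
      intro c hc
      obtain ⟨i, hi, hci⟩ := List.mem_iff_getElem.1 hc
      have hik : i < k := hbslen ▸ hi
      have : ((cs.drop a).take k)[i]? = some 'd' := by
        rw [List.getElem?_take_of_lt hik, List.getElem?_drop]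
        exact hl i hik
      rw [List.getElem?_eq_getElem hi, hci] at this
      simpa using this
    refine ⟨h0, cs.take a, (cs.drop a).take k, cs.drop (a + k), hsplit, has, hbs, ?_⟩
    intro c hc
    have hcntsplit : k = (cs.take a).count 'd' + ((cs.drop a).take k).count 'd'
        + (cs.drop (a + k)).count 'd' := by
      have h2 := congrArg (List.count 'd') hsplit
      simp only [List.count_append] at h2
      omega
    have hcas : (cs.take a).count 'd' = 0 :=
      List.count_eq_zero.2 fun h => by simpa [hdg] using has _ h
    have hcbs : ((cs.drop a).take k).count 'd' = k := by
      rw [List.count_eq_length.2 fun b hb => (hbs b hb).symm, hbslen]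
    have hces : (cs.drop (a + k)).count 'd' = 0 := by omega
    have hcd : c ≠ 'd' := fun h => (List.count_eq_zero.1 hces) (h ▸ hc)
    have hmem : c ∈ cs := List.mem_of_mem_drop hc
    have := hall c hmem
    simp only [Bool.or_eq_true, beq_iff_eq] at this
    tauto
  · rintro ⟨-, as, bs, es, hsplit, has, hbs, hes⟩
    intro cid hcid
    have hcidk : cid < k := List.mem_range.1 hcid
    rw [hstep]
    have hdas : 'd' ∉ as := fun h => by simpa [hdg] using has _ h
    have hdes : 'd' ∉ es := fun h => by simpa [hdg] using hes _ h
    have hdbs : 'd' ∈ bs := by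
      rw [hsplit] at hd
      simp only [List.mem_append] at hd
      tauto
    have hgetA : cs[as.length]? = some 'd' := by
      rw [hsplit, List.append_assoc, List.getElem?_append_right le_rfl, Nat.sub_self]
      obtain ⟨b, bs', rfl⟩ := List.exists_cons_of_ne_nil (List.ne_nil_of_mem hdbs)
      simp [hbs b (by simp)]
    have hlessA : ∀ i, i < as.length → cs[i]? ≠ some 'd' := by
      intro i hi hcontra
      rw [hsplit, List.append_assoc, List.getElem?_append_left hi] at hcontra
      obtain ⟨hlt, heq⟩ := List.getElem?_eq_some_iff.1 hcontra
      exact hdas (heq ▸ List.getElem_mem hlt)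
    have haa : a = as.length := by
      by_contra hne2
      rcases Nat.lt_or_ge a as.length with h | h
      · exact hlessA a h hget
      · exact hmin' as.length (by omega) hgetA
    have hkk : k ≤ bs.length := by
      have hceq := congrArg (List.count 'd') hsplit
      simp only [List.count_append] at hceq
      have h1 : as.count 'd' = 0 := List.count_eq_zero.2 hdas
      have h3 : es.count 'd' = 0 := List.count_eq_zero.2 hdes
      have h2 : bs.count 'd' ≤ bs.length := List.count_le_length
      omega
    rw [haa, hsplit, List.append_assoc,
      List.getElem?_append_right (Nat.le_add_right _ _), Nat.add_sub_cancel_left,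
      List.getElem?_append_left (by omega : cid < bs.length),
      List.getElem?_eq_getElem (by omega)]
    simp only [Option.some.injEq]
    exact hbs _ (List.getElem_mem _)

theorem pvA_iff (cs : List Char) :
    (if cs.length == 0 then false
     else if !(cs.all fun c => pvNumChar.contains c) then false
     else if !(PySem.Chars.isIn ['d'] cs) then true
     else
       (List.range (PySem.Chars.count cs ['d'])).all fun cid =>
         PySem.List.pyGet? cs ((cid : Int) + PySem.Chars.find cs ['d']) == some 'd') = true
      ↔ pvShape cs := by
  by_cases h0 : cs = []
  · subst h0; simp [pvShape]
  · rw [if_neg (by simp [h0])]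
    by_cases hall : ∀ c ∈ cs, (PySem.Chars.isdigit c || c == 'd') = true
    · have hallb : (cs.all fun c => pvNumChar.contains c) = true := by
        rw [List.all_eq_true]
        intro c hc
        rw [pvCharset]
        exact hall c hc
      rw [hallb]
      simp only [Bool.not_true, Bool.false_eq_true, if_false]
      by_cases hd : 'd' ∈ cs
      · rw [(PySem.Chars.isIn_iff_infix _ _).2 ((List.singleton_infix_iff _ _).2 hd)]
        simp only [Bool.not_true, Bool.false_eq_true, if_false]
        exact pvA_core cs h0 hall hd
      · rw [(PySem.Chars.isIn_eq_false_iff _ _).2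
          (fun h => hd ((List.singleton_infix_iff _ _).1 h))]
        simp only [Bool.not_false, if_true, true_iff]
        refine ⟨h0, cs, [], [], by simp, ?_, by simp, by simp⟩
        intro c hc
        have := hall c hc
        simp only [Bool.or_eq_true, beq_iff_eq] at this
        rcases this with h | h
        · exact h
        · exact absurd (h ▸ hc) hd
    · have hallb : (cs.all fun c => pvNumChar.contains c) = false := by
        rw [Bool.eq_false_iff]
        intro h
        rw [List.all_eq_true] at h
        exact hall fun c hc => (pvCharset c) ▸ h c hc
      rw [hallb]
      simp only [Bool.not_false, if_true, Bool.false_eq_true, false_iff]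
      rintro ⟨-, as, bs, es, hsplit, has, hbs, hes⟩
      refine hall fun c hc => ?_
      rw [hsplit] at hc
      simp only [List.mem_append] at hc
      simp only [Bool.or_eq_true, beq_iff_eq]
      rcases hc with (hc | hc) | hc
      · exact Or.inl (has c hc)
      · exact Or.inr (hbs c hc)
      · exact Or.inl (hes c hc)

-- ===== VERDICT (by name: the statement is the Claim_ definition above) =====
theorem iflegal_dfunction_spec : Claim_equal_iflegal_dfunction := by
  intro ipt _
  unfold Spec_iflegal_dfunction iflegal_dfunction iflegal_dfunction_alt
  rw [Bool.eq_iff_iff, pvA_iff, pvB_iff]
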